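-- pv_equiv track=rewrite | github.com/DavisChappins/Condor_IGC_Analysis | helperFile.py | determine_if_task_completed
-- ===== SOURCE A (Python) =====
-- def determine_if_task_completed(igc_data):
--
--     for line in igc_data:
--         if 'LCONFlightInfoPlayerStatus=' in line:
--             equal_index = line.index('=')
--             finished_yes_no = line[equal_index + 1:].strip().upper()
--             if finished_yes_no == 'FINISHED':
--                 finish_status = 'Task Completed'
--             else:
--                 finish_status = 'Task Not Completed'
--     return finish_status
-- ===== SOURCE B (Python) =====
-- def determine_if_task_completed(igc_data):
--     # scan backwards: the last marker line is the first hit from the end (early exit)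
--     last = next(l for l in reversed(list(igc_data))
--                 if 'LCONFlightInfoPlayerStatus=' in l)
--     tail = last[last.index('=') + 1:]
--     return ('Task Completed' if tail.strip().upper() == 'FINISHED'
--             else 'Task Not Completed')
-- ===== Notes on version B (the rewrite author's own statement) =====
-- stated objective: simpler
-- what changed: A scans forward classifying every marker line and overwriting an accumulator; B scans backwards with next() over reversed(), returning at the first hit from the end with no accumulator and no per-hit classification; when no line matches both raise (A UnboundLocalError, B StopIteration), excluded by Pre_.
import Mathlib
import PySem

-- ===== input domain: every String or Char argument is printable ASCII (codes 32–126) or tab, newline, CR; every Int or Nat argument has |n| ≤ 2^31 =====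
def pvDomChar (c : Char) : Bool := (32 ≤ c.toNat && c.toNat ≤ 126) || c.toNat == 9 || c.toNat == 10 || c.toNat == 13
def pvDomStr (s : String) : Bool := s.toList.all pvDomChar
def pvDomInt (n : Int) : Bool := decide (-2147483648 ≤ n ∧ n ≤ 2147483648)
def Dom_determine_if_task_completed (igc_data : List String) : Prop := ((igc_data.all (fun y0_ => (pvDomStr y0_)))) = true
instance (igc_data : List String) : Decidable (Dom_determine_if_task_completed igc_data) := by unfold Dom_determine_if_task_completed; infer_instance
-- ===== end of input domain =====

-- B replaces A's forward scan (classify every marker line, later hits overwrite the accumulator)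
-- by a backward scan that returns at the first hit from the end — simpler: no accumulator, one classification.

-- ===== PORT A =====
-- finish_status is threaded as Option String: none = name still unbound
-- (the final 'return finish_status' raises UnboundLocalError there — excluded by Pre_; getD "" is unreachable inside Pre_).
-- line.index('=') is ported as PySem.Str.find: inside the taken branch the marker (which contains '=')
-- is in line, so '=' occurs and find = index (no ValueError possible).
def determine_if_task_completed (igc_data : List String) : String :=
  (igc_data.foldl
    (fun finish_status line =>
      if PySem.Str.isIn "LCONFlightInfoPlayerStatus=" line then
        if PySem.Str.upper (PySem.Str.strip
              (PySem.Str.slice line (some (PySem.Str.find line "=" + 1)) none)) = "FINISHED"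
        then some "Task Completed"
        else some "Task Not Completed"
      else finish_status)
    (none : Option String)).getD ""

-- ===== PORT B =====
-- next(l for l in reversed(list(igc_data)) if marker in l): first match of the reversed list, early exit.
def pvFindRev (ls : List String) : Option String :=
  match ls with
  | [] => none
  | l :: rest =>
      if PySem.Str.isIn "LCONFlightInfoPlayerStatus=" l then some l else pvFindRev rest

-- none = next() raises StopIteration (outside Pre_; the "" branch is unreachable inside Pre_).
def determine_if_task_completed_alt (igc_data : List String) : String :=
  match pvFindRev igc_data.reverse with
  | none => ""
  | some last =>
      if PySem.Str.upper (PySem.Str.strip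
            (PySem.Str.slice last (some (PySem.Str.find last "=" + 1)) none)) = "FINISHED"
      then "Task Completed"
      else "Task Not Completed"

-- ===== PRECONDITION & SPEC =====
-- Pre_: some line contains the marker; otherwise A raises UnboundLocalError and B raises StopIteration.
def Pre_determine_if_task_completed (igc_data : List String) : Prop :=
  igc_data.any (fun line => PySem.Str.isIn "LCONFlightInfoPlayerStatus=" line) = true
instance (igc_data : List String) : Decidable (Pre_determine_if_task_completed igc_data) := by unfold Pre_determine_if_task_completed; infer_instance

def pvWitness_determine_if_task_completed : List String := ["LCONFlightInfoPlayerStatus=Finished"]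

def Spec_determine_if_task_completed (igc_data : List String) (out : String) : Prop := out = determine_if_task_completed_alt igc_data
instance (igc_data : List String) (out : String) : Decidable (Spec_determine_if_task_completed igc_data out) := by unfold Spec_determine_if_task_completed; infer_instance

-- ===== CLAIM =====
def Claim_equal_determine_if_task_completed : Prop := ∀ (igc_data : List String), Dom_determine_if_task_completed igc_data → Pre_determine_if_task_completed igc_data → Spec_determine_if_task_completed igc_data (determine_if_task_completed igc_data)

-- ===== LEMMAS AND PROOFS =====

/-- B's backward early-exit search is `find?` on the reversed list. -/
lemma pvFindRev_eq_find? (ls : List String) :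
    pvFindRev ls = ls.find? (fun l => PySem.Str.isIn "LCONFlightInfoPlayerStatus=" l) := by
  induction ls with
  | nil => rfl
  | cons l rest ih =>
      show (if PySem.Str.isIn "LCONFlightInfoPlayerStatus=" l then some l else pvFindRev rest)
          = List.find? (fun l => PySem.Str.isIn "LCONFlightInfoPlayerStatus=" l) (l :: rest)
      cases h : PySem.Str.isIn "LCONFlightInfoPlayerStatus=" l with
      | true => rw [if_pos rfl, List.find?_cons_of_pos (by exact h)]
      | false => rw [if_neg (by simp), ih, List.find?_cons_of_neg (by rw [h]; simp)]

/-- A's overwrite loop ends at `g` of the first match of the REVERSED list (or `init` if none). -/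
lemma foldl_overwrite_eq_find_rev (P : String → Bool) (g : String → Option String) :
    ∀ (xs : List String) (init : Option String),
      xs.foldl (fun acc l => if P l then g l else acc) init
        = (xs.reverse.find? P).elim init g := by
  intro xs
  induction xs with
  | nil => intro init; rfl
  | cons x xs ih =>
      intro init
      rw [List.foldl_cons, ih]
      rw [List.reverse_cons, List.find?_append]
      cases h : xs.reverse.find? P with
      | none => by_cases hP : P x <;> simp [List.find?, hP]
      | some l => simp

-- ===== VERDICT =====
theorem determine_if_task_completed_spec : Claim_equal_determine_if_task_completed := by
  intro igc_data _ _
  unfold Spec_determine_if_task_completed determine_if_task_completed determine_if_task_completed_alt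
  rw [foldl_overwrite_eq_find_rev
        (fun line => PySem.Str.isIn "LCONFlightInfoPlayerStatus=" line)
        (fun line =>
          if PySem.Str.upper (PySem.Str.strip
                (PySem.Str.slice line (some (PySem.Str.find line "=" + 1)) none)) = "FINISHED"
          then some "Task Completed"
          else some "Task Not Completed"),
      pvFindRev_eq_find?]
  cases h : igc_data.reverse.find? (fun line => PySem.Str.isIn "LCONFlightInfoPlayerStatus=" line) with
  | none => simp only []; rfl
  | some last => simp only [Option.elim]; split <;> rfl
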